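-- pv_equiv track=rewrite | github.com/wells-wood-research/chronowska-stam-wood-2024-protein-design-archive | scripts/print_pdb_codes_string.py | format_codes
-- ===== SOURCE A (Python) =====
-- def format_codes(codes, newline_every):
--     codes = list(codes)
--     if not newline_every or newline_every <= 0:
--         return ",".join(codes)
--
--     lines = [
--         ",".join(codes[i:i + newline_every])
--         for i in range(0, len(codes), newline_every)
--     ]
--     return "\n\n".join(lines)
-- ===== SOURCE B (Python) =====
-- def format_codes(codes, newline_every):
--     codes = list(codes)
--     if not newline_every or newline_every <= 0:
--         return ",".join(codes)
--     parts = []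
--     for i, code in enumerate(codes):
--         if i == 0:
--             parts.append(code)
--         elif i % newline_every == 0:
--             parts.append("\n\n")
--             parts.append(code)
--         else:
--             parts.append(",")
--             parts.append(code)
--     return "".join(parts)
-- ===== Notes on version B (the rewrite author's own statement) =====
-- stated objective: alternative
-- what changed: B makes one pass with enumerate, choosing each element's separator by i % newline_every ("\n\n" at group boundaries, "," otherwise), instead of building chunk substrings with slices and joining the joins.
import Mathlib
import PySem

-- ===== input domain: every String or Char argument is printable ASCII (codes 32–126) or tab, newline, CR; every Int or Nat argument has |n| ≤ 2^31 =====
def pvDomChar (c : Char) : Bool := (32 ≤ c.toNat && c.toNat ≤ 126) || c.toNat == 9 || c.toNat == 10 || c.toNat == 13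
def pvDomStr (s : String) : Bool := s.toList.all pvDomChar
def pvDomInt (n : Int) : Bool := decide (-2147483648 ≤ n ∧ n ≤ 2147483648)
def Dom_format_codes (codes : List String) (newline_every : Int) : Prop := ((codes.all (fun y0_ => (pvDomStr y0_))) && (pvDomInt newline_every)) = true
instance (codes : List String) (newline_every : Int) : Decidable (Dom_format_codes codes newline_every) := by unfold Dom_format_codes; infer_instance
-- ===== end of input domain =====

-- B joins the codes in one enumerate pass, picking each element's separator by i % newline_every,
-- instead of A's chunk-slice-and-join-of-joins; same cost, different decomposition.

-- ===== PORT A =====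
def format_codes (codes : List String) (newline_every : Int) : String :=
  if newline_every = 0 ∨ newline_every ≤ 0 then
    PySem.Str.join "," codes
  else
    let lines := (PySem.List.pyRange 0 (codes.length : Int) newline_every).map
      (fun i => PySem.Str.join ","
        (PySem.List.slice codes (some i) (some (i + newline_every))))
    PySem.Str.join "\n\n" lines

-- ===== PORT B =====
def format_codes_alt (codes : List String) (newline_every : Int) : String :=
  if newline_every ≤ 0 then
    PySem.Str.join "," codes
  else
    let parts := (PySem.List.enumerate codes).foldl
      (fun acc p =>
        if p.1 = 0 then acc ++ [p.2]
        else if PySem.Int.mod p.1 newline_every = 0 then acc ++ ["\n\n", p.2]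
        else acc ++ [",", p.2]) []
    PySem.Str.join "" parts

-- ===== PRECONDITION & SPEC =====
def Spec_format_codes (codes : List String) (newline_every : Int) (out : String) : Prop := out = format_codes_alt codes newline_every
instance (codes : List String) (newline_every : Int) (out : String) : Decidable (Spec_format_codes codes newline_every out) := by unfold Spec_format_codes; infer_instance

-- ===== CLAIM (what is proved, stated in full; the proofs are below) =====
def Claim_equal_format_codes : Prop := ∀ (codes : List String) (newline_every : Int), Dom_format_codes codes newline_every → Spec_format_codes codes newline_every (format_codes codes newline_every)


-- ===== LEMMAS AND PROOFS =====

-- the separator B emits before the element at index i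
def pySep (k i : Int) : List Char :=
  if i = 0 then [] else if PySem.Int.mod i k = 0 then "\n\n".toList else ",".toList

-- character stream B produces from index i on
def catSep (k : Int) : Int → List String → List Char
  | _, [] => []
  | i, c :: cs => pySep k i ++ c.toList ++ catSep k (i + 1) cs

-- ","-separated continuation of a line: the next r elements, each preceded by ","
def prefixPart : Nat → List String → List Char
  | 0, _ => []
  | _ + 1, [] => []
  | r + 1, c :: cs => ",".toList ++ c.toList ++ prefixPart r cs

-- common chunked-recursion normal form of both results
def chunksJoin (K : Nat) : List String → List Char
  | [] => []
  | c :: rest =>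
      c.toList ++ prefixPart (K - 1) rest ++
        (if rest.drop (K - 1) = [] then [] else "\n\n".toList ++ chunksJoin K (rest.drop (K - 1)))
  termination_by cs => cs.length
  decreasing_by simp only [List.length_cons, List.length_drop]; omega

lemma chunksJoin_nil (K : Nat) : chunksJoin K [] = [] := by simp [chunksJoin]

lemma chunksJoin_cons (K : Nat) (c : String) (rest : List String) :
    chunksJoin K (c :: rest)
      = c.toList ++ prefixPart (K - 1) rest ++
          (if rest.drop (K - 1) = [] then [] else "\n\n".toList ++ chunksJoin K (rest.drop (K - 1))) := by
  rw [chunksJoin.eq_def]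

lemma join_empty_sep (l : List (List Char)) : PySem.Chars.join [] l = l.flatten := by
  match l with
  | [] => simp [PySem.Chars.join_nil]
  | [p] => simp [PySem.Chars.join_singleton]
  | p :: q :: rest =>
      rw [PySem.Chars.join_cons_cons, join_empty_sep (q :: rest)]
      simp

lemma fold_catSep (k : Int) (cs : List String) : ∀ (i : Int) (acc : List String),
    ((PySem.List.enumerate cs i).foldl
      (fun acc p =>
        if p.1 = 0 then acc ++ [p.2]
        else if PySem.Int.mod p.1 k = 0 then acc ++ ["\n\n", p.2]
        else acc ++ [",", p.2]) acc).flatMap String.toList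
    = acc.flatMap String.toList ++ catSep k i cs := by
  induction cs with
  | nil => intro i acc; simp [PySem.List.enumerate, catSep]
  | cons c rest ih =>
      intro i acc
      rw [PySem.List.enumerate_cons]
      simp only [List.foldl_cons, catSep, pySep]
      by_cases h0 : i = 0
      · simp [h0, ih]
      · by_cases hm : PySem.Int.mod i k = 0
        · simp [h0, hm, ih]
        · simp [h0, hm, ih]

lemma prefix_join (r : Nat) (c : List Char) (rest : List String) :
    PySem.Chars.join ",".toList (c :: (rest.take r).map String.toList)
      = c ++ prefixPart r rest := by
  match r, rest with
  | 0, rest => simp [prefixPart, PySem.Chars.join_singleton]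
  | r + 1, [] => simp [prefixPart, PySem.Chars.join_singleton]
  | r + 1, x :: xs =>
      simp only [List.take, List.map, prefixPart]
      rw [PySem.Chars.join_cons_cons, prefix_join r x.toList xs]
      simp

lemma not_dvd_of_between {k r : Int} (h1 : 0 < r) (h2 : r < k) : ¬ (k ∣ r) :=
  fun hd => absurd (Int.le_of_dvd h1 hd) (not_le.mpr h2)

lemma catSep_sub (k : Int) (hk : 0 < k) :
    ∀ (r : Nat) (rest : List String) (t : Int), 0 ≤ t → (r : Int) < k →
    catSep k (k * (t + 1) - r) rest = prefixPart r rest ++ catSep k (k * (t + 1)) (rest.drop r) := by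
  intro r
  induction r with
  | zero => intro rest t ht hr; simp [prefixPart]
  | succ r ih =>
      intro rest t ht hr
      match rest with
      | [] => simp [catSep, prefixPart]
      | c :: cs =>
          have hkk : k ≤ k * (t + 1) := le_mul_of_one_le_right hk.le (by omega)
          have hr' : (r : Int) + 1 < k := by push_cast at hr; omega
          have hne0 : (k * (t + 1) - ((r : Int) + 1)) ≠ 0 := by omega
          have hnem : PySem.Int.mod (k * (t + 1) - ((r : Int) + 1)) k ≠ 0 := by
            rw [Ne, PySem.Int.mod_eq_zero_iff_dvd]
            intro hd
            have hd' : k ∣ ((r : Int) + 1) := by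
              have heq : ((r : Int) + 1) = k * (t + 1) - (k * (t + 1) - ((r : Int) + 1)) := by ring
              rw [heq]
              exact dvd_sub (Dvd.intro (t + 1) rfl) hd
            exact not_dvd_of_between (by omega) hr' hd'
          simp only [catSep, pySep]
          push_cast
          rw [if_neg hne0, if_neg hnem]
          have harg : k * (t + 1) - ((r : Int) + 1) + 1 = k * (t + 1) - r := by ring
          rw [harg, ih cs t ht (by omega)]
          simp [prefixPart]

lemma catSep_chunks (k : Int) (hk : 0 < k) :
    ∀ (n : Nat) (cs : List String), cs.length = n → ∀ (t : Int), 0 ≤ t →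
    catSep k (k * t) cs
      = (if cs = [] then [] else if t = 0 then [] else "\n\n".toList) ++ chunksJoin k.toNat cs := by
  intro n
  induction n using Nat.strong_induction_on with
  | _ n ih =>
    intro cs hlen t ht
    match cs with
    | [] => simp [catSep, chunksJoin_nil]
    | c :: rest =>
      have hK1 : ((k.toNat - 1 : Nat) : Int) = k - 1 := by omega
      have hstep : catSep k (k * t + 1) rest
          = prefixPart (k.toNat - 1) rest ++ catSep k (k * (t + 1)) (rest.drop (k.toNat - 1)) := by
        have h := catSep_sub k hk (k.toNat - 1) rest t ht (by omega)
        rw [hK1] at h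
        have harg : k * (t + 1) - (k - 1) = k * t + 1 := by ring
        rw [harg] at h
        exact h
      have hrec : catSep k (k * (t + 1)) (rest.drop (k.toNat - 1))
          = (if rest.drop (k.toNat - 1) = [] then [] else "\n\n".toList)
            ++ chunksJoin k.toNat (rest.drop (k.toNat - 1)) := by
        have hlt : (rest.drop (k.toNat - 1)).length < n := by
          simp only [List.length_drop]
          simp at hlen; omega
        have h := ih _ hlt (rest.drop (k.toNat - 1)) rfl (t + 1) (by omega)
        rw [h]
        by_cases hd : rest.drop (k.toNat - 1) = []
        · simp [hd, chunksJoin_nil]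
        · rw [if_neg hd, if_neg hd, if_neg (show ¬ (t + 1 = 0) by omega)]
      have hsep : pySep k (k * t) = if t = 0 then [] else "\n\n".toList := by
        by_cases ht0 : t = 0
        · simp [pySep, ht0]
        · have hkt : k * t ≠ 0 := by
            intro h; rcases mul_eq_zero.mp h with h | h <;> omega
          have hmod : PySem.Int.mod (k * t) k = 0 := by
            rw [PySem.Int.mod_eq_zero_iff_dvd]; exact Dvd.intro t rfl
          simp [pySep, hkt, hmod, ht0]
      show pySep k (k * t) ++ c.toList ++ catSep k (k * t + 1) rest = _
      rw [hsep, hstep, hrec, chunksJoin_cons]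
      by_cases hd : rest.drop (k.toNat - 1) = [] <;> by_cases ht0 : t = 0 <;>
        simp [hd, ht0, chunksJoin_nil]

-- number of lines A produces for n codes, in Nat arithmetic
def numLines (K n : Nat) : Nat := if 0 < n then (n + K - 1) / K else 0

lemma numLines_bridge (K : Nat) (hK : 0 < K) (n : Nat) :
    (if (0 : Int) < (n : Int) then (((n : Int) - 0 + (K : Int) - 1) / (K : Int)).toNat else 0)
      = numLines K n := by
  unfold numLines
  by_cases hn : 0 < n
  · rw [if_pos (by omega : (0 : Int) < (n : Int)), if_pos hn]
    have hcast : ((n : Int)) - 0 + (K : Int) - 1 = ((n + K - 1 : Nat) : Int) := by omega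
    rw [hcast, ← Int.natCast_ediv]
    exact Int.toNat_natCast _
  · rw [if_neg (by omega : ¬ (0 : Int) < (n : Int)), if_neg hn]

lemma numLines_one (K : Nat) (hK : 0 < K) (n : Nat) (hn : 0 < n) (hle : n ≤ K) :
    numLines K n = 1 := by
  unfold numLines
  rw [if_pos hn]
  have h1 : n + K - 1 = (n - 1) + K := by omega
  rw [h1, Nat.add_div_right _ hK, Nat.div_eq_of_lt (by omega)]

lemma numLines_succ (K : Nat) (hK : 0 < K) (n : Nat) (hgt : K < n) :
    numLines K n = numLines K (n - K) + 1 := by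
  unfold numLines
  rw [if_pos (by omega), if_pos (by omega)]
  have h1 : n + K - 1 = ((n - K) + K - 1) + K := by omega
  rw [h1, Nat.add_div_right _ hK]

lemma numLines_pos (K : Nat) (hK : 0 < K) (n : Nat) (hn : 0 < n) : 0 < numLines K n := by
  by_cases hle : n ≤ K
  · rw [numLines_one K hK n hn hle]; omega
  · rw [numLines_succ K hK n (by omega)]; omega

lemma lines_eq (K : Nat) (hK : 0 < K) (codes : List String) :
    (PySem.List.pyRange 0 (codes.length : Int) (K : Int)).map
        (fun i => PySem.Str.join "," (PySem.List.slice codes (some i) (some (i + (K : Int)))))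
      = (List.range (numLines K codes.length)).map
          (fun j => PySem.Str.join "," ((codes.drop (K * j)).take K)) := by
  rw [PySem.List.pyRange_of_pos _ _ (by omega : (0 : Int) < (K : Int)), List.map_map]
  have hnum : (if (0 : Int) < (codes.length : Int) then (((codes.length : Int) - 0 + (K : Int) - 1) / (K : Int)).toNat else 0)
      = numLines K codes.length := numLines_bridge K hK codes.length
  rw [hnum]
  apply List.map_congr_left
  intro j _
  simp only [Function.comp]
  have harg1 : (0 : Int) + (K : Int) * (j : Int) = ((K * j : Nat) : Int) := by push_cast; ring
  rw [harg1, PySem.List.slice_natCast_add]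

lemma join_lines (K : Nat) (hK : 0 < K) :
    ∀ (n : Nat) (codes : List String), codes.length = n →
    PySem.Chars.join "\n\n".toList
        (((List.range (numLines K n)).map
          (fun j => PySem.Str.join "," ((codes.drop (K * j)).take K))).map String.toList)
      = chunksJoin K codes := by
  intro n
  induction n using Nat.strong_induction_on with
  | _ n ih =>
    intro codes hlen
    match codes with
    | [] =>
      have h0 : n = 0 := by simp at hlen; omega
      simp [h0, numLines, PySem.Chars.join_nil, chunksJoin_nil]
    | c :: rest =>
      obtain ⟨K', hK'⟩ : ∃ K', K = K' + 1 := ⟨K - 1, by omega⟩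
      have hn : 0 < n := by simp at hlen; omega
      have hlen' : rest.length = n - 1 := by simp at hlen; omega
      -- the first line
      have hhead : (PySem.Str.join "," ((List.drop (K * 0) (c :: rest)).take K)).toList
          = c.toList ++ prefixPart (K - 1) rest := by
        rw [PySem.Str.toList_join]
        have h1 : (List.drop (K * 0) (c :: rest)).take K = c :: rest.take K' := by
          simp [hK', List.take_succ_cons]
        rw [h1, List.map_cons]
        have h2 := prefix_join K' c.toList rest
        rw [h2]
        have h3 : K - 1 = K' := by omega
        rw [h3]
      -- later lines read from the rest of the list
      have htail : ∀ j : Nat,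
          PySem.Str.join "," ((List.drop (K * (j + 1)) (c :: rest)).take K)
            = PySem.Str.join "," ((List.drop (K * j) (rest.drop K')).take K) := by
        intro j
        have hidx : K * (j + 1) = (K' + K * j) + 1 := by rw [hK']; ring
        have hls : (List.drop (K * (j + 1)) (c :: rest)).take K
            = (List.drop (K * j) (rest.drop K')).take K := by
          rw [hidx, List.drop_succ_cons, List.drop_drop]
        rw [hls]
      have hdroplen : (rest.drop K').length = n - K := by
        simp only [List.length_drop]
        omega
      by_cases hle : n ≤ K
      · -- a single line
        have h1 : numLines K n = 1 := numLines_one K hK n hn hle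
        rw [h1]
        simp only [List.range_one, List.map_cons, List.map_nil]
        rw [PySem.Chars.join_singleton, hhead, chunksJoin_cons]
        have hd : rest.drop (K - 1) = [] := by
          rw [List.drop_eq_nil_iff]
          omega
        simp [hd]
      · -- at least two lines
        have hgt : K < n := by omega
        have hsucc : numLines K n = numLines K (n - K) + 1 := numLines_succ K hK n hgt
        have hmpos : 0 < numLines K (n - K) := numLines_pos K hK (n - K) (by omega)
        rw [hsucc, List.range_succ_eq_map, List.map_cons, List.map_map, List.map_cons]
        have htails : (List.range (numLines K (n - K))).map
              ((fun j => PySem.Str.join "," ((List.drop (K * j) (c :: rest)).take K)) ∘ Nat.succ)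
            = (List.range (numLines K (n - K))).map
              (fun j => PySem.Str.join "," ((List.drop (K * j) (rest.drop K')).take K)) := by
          apply List.map_congr_left
          intro j _
          simp only [Function.comp, Nat.succ_eq_add_one]
          exact htail j
        rw [htails]
        have hih := ih (n - K) (by omega) (rest.drop K') hdroplen
        obtain ⟨t0, ts, hT⟩ : ∃ t0 ts,
            ((List.range (numLines K (n - K))).map
              (fun j => PySem.Str.join "," ((List.drop (K * j) (rest.drop K')).take K))).map String.toList
            = t0 :: ts := by
          cases hTc : ((List.range (numLines K (n - K))).map
              (fun j => PySem.Str.join "," ((List.drop (K * j) (rest.drop K')).take K))).map String.toList with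
          | nil =>
            exfalso
            have hl := congrArg List.length hTc
            simp at hl
            omega
          | cons t0 ts => exact ⟨t0, ts, rfl⟩
        rw [hT, PySem.Chars.join_cons_cons, ← hT, hih, hhead, chunksJoin_cons]
        have hd : rest.drop (K - 1) ≠ [] := by
          rw [Ne, List.drop_eq_nil_iff]
          omega
        have hdk : rest.drop (K - 1) = rest.drop K' := by rw [hK']; simp
        rw [hdk] at hd ⊢
        simp [hd]

lemma empty_toList : ("" : String).toList = [] := rfl

-- ===== VERDICT (by name: the statement is the Claim_ definition above) =====
theorem format_codes_spec : Claim_equal_format_codes := by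
  intro codes k _hdom
  unfold Spec_format_codes format_codes format_codes_alt
  by_cases hk : k ≤ 0
  · rw [if_pos (Or.inr hk), if_pos hk]
  · have hk' : 0 < k := by omega
    obtain ⟨K, hKk⟩ : ∃ K : Nat, k = (K : Int) := ⟨k.toNat, by omega⟩
    subst hKk
    have hK : 0 < K := by omega
    rw [if_neg (by omega : ¬ ((K : Int) = 0 ∨ (K : Int) ≤ 0)), if_neg hk]
    apply String.toList_inj.mp
    rw [PySem.Str.toList_join, PySem.Str.toList_join, empty_toList, join_empty_sep]
    have hb := fold_catSep (K : Int) codes 0 []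
    have hflat : ∀ l : List String, l.flatMap String.toList = (l.map String.toList).flatten := by
      intro l; simp [List.flatMap]
    rw [hflat, hflat] at hb
    rw [hb]
    simp only [List.map_nil, List.flatten_nil, List.nil_append]
    have hB : catSep (K : Int) 0 codes = chunksJoin K codes := by
      have h := catSep_chunks (K : Int) (by omega) codes.length codes rfl 0 le_rfl
      simpa using h
    rw [hB, lines_eq K hK codes]
    exact join_lines K hK codes.length codes rfl
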